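-- pv_equiv track=rewrite | github.com/marisagloor/HB-Code-Challenges | lazy-lemmings/lemmings.py | furthest_optimized
-- ===== SOURCE A (Python) =====
-- def furthest_optimized(num_holes, cafes):
--     largest = 0
--     if cafes[0] > largest:
--         largest = cafes[0]
--
--     if num_holes - 1 - cafes[-1] > largest:
--         largest = num_holes - 1 - cafes[-1]
--
--     if len(cafes) > 2:
--         for i, cafe in enumerate(cafes[1:-1]):
--             lower = int((cafe - cafes[i])/ 2)
--             higher = int((cafes[i + 2] - cafe) / 2)
--             if lower > largest:
--                 largest = lower
--             if higher > largest:
--                 largest = higher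
--     else:
--         mid = int((cafes[-1] - cafes[0])/2)
--         if mid > largest:
--             largest = mid
--
--     return largest
-- ===== SOURCE B (Python) =====
-- def _max_half_gap(cafes, lo, hi):
--     # max of int((cafes[i+1]-cafes[i])/2) over lo <= i < hi, by divide and conquer
--     if hi - lo == 1:
--         return int((cafes[lo + 1] - cafes[lo]) / 2)
--     mid = (lo + hi) // 2
--     left = _max_half_gap(cafes, lo, mid)
--     right = _max_half_gap(cafes, mid, hi)
--     return left if left > right else right
--
--
-- def furthest_optimized(num_holes, cafes):
--     best = 0
--     if cafes[0] > best:
--         best = cafes[0]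
--     edge = num_holes - 1 - cafes[-1]
--     if edge > best:
--         best = edge
--     if len(cafes) >= 2:
--         g = _max_half_gap(cafes, 0, len(cafes) - 1)
--         if g > best:
--             best = g
--     return best
-- ===== Notes on version B (the rewrite author's own statement) =====
-- stated objective: alternative
-- what changed: Replaces A's left-to-right scan with its len>2/else branching and overlapping lower/higher double computation by a divide-and-conquer recursion over index ranges that computes the maximum half-gap between consecutive cafes, combined with the two edge distances.
-- outside the precondition, e.g. on furthest_optimized(10, []): A raises IndexError, B raises IndexError
import Mathlib
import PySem

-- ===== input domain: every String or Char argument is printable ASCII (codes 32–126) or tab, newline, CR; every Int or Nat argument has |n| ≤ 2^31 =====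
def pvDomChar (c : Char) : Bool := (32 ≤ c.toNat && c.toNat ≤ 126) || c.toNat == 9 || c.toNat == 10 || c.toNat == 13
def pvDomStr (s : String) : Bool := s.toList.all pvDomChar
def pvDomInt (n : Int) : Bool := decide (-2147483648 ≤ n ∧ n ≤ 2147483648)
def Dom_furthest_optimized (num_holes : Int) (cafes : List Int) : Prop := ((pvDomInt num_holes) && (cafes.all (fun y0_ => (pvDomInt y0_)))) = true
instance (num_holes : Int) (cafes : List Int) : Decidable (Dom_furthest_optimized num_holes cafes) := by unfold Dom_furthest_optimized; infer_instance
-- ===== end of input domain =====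

-- B replaces A's single left-to-right scan (with its len>2/else branch and overlapping
-- lower/higher double computation) by a divide-and-conquer recursion over index ranges
-- that computes the maximum half-gap; objective: alternative decomposition, same cost.

-- ===== PORT A =====
-- int(x/2): Python divides to float and truncates toward zero; on Dom |x| ≤ 2^33 < 2^53 the float
-- division is exact, so int((y-x)/2) = Int.tdiv (y-x) 2 exactly.
-- cafes[0] / cafes[-1] raise IndexError on [], excluded by Pre_; ported with pyGetD under Pre_.
-- 'if x > largest: largest = x', the update statement A repeats four times
def pybump (L x : Int) : Int := if x > L then x else L

def furthest_optimized (num_holes : Int) (cafes : List Int) : Int :=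
  let largest : Int := 0
  let largest := pybump largest (PySem.List.pyGetD cafes 0 0)
  let largest := pybump largest (num_holes - 1 - PySem.List.pyGetD cafes (-1) 0)
  if (cafes.length : Int) > 2 then
    (PySem.List.enumerate (PySem.List.slice cafes (some 1) (some (-1))) 0).foldl
      (fun L p =>
        let lower := Int.tdiv (p.2 - PySem.List.pyGetD cafes p.1 0) 2
        let higher := Int.tdiv (PySem.List.pyGetD cafes (p.1 + 2) 0 - p.2) 2
        pybump (pybump L lower) higher) largest
  else
    let mid := Int.tdiv (PySem.List.pyGetD cafes (-1) 0 - PySem.List.pyGetD cafes 0 0) 2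
    pybump largest mid

-- ===== PORT B =====
-- literal port of Source B's _max_half_gap: divide and conquer on the index range [lo, hi);
-- the 'hi ≤ lo + 1' guard coincides with Source B's 'hi - lo == 1' base case on every call
-- Source B makes (hi > lo always) and only additionally makes the function total.
def maxhalf (cafes : List Int) (lo hi : Nat) : Int :=
  if hi ≤ lo + 1 then
    Int.tdiv (PySem.List.pyGetD cafes ((lo : Int) + 1) 0 - PySem.List.pyGetD cafes (lo : Int) 0) 2
  else
    let mid := (lo + hi) / 2
    let left := maxhalf cafes lo mid
    let right := maxhalf cafes mid hi
    if left > right then left else right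
termination_by hi - lo
decreasing_by all_goals omega

-- literal port of Source B's furthest_optimized
def furthest_optimized_alt (num_holes : Int) (cafes : List Int) : Int :=
  let best : Int := 0
  let best := if PySem.List.pyGetD cafes 0 0 > best then PySem.List.pyGetD cafes 0 0 else best
  let edge := num_holes - 1 - PySem.List.pyGetD cafes (-1) 0
  let best := if edge > best then edge else best
  if (cafes.length : Int) ≥ 2 then
    let g := maxhalf cafes 0 (cafes.length - 1)
    if g > best then g else best
  else best

-- ===== PRECONDITION & SPEC =====
-- Pre_ excludes only the empty cafes list, on which A (and B) raise IndexError at cafes[0].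
def Pre_furthest_optimized (num_holes : Int) (cafes : List Int) : Prop := cafes ≠ []
instance (num_holes : Int) (cafes : List Int) : Decidable (Pre_furthest_optimized num_holes cafes) := by unfold Pre_furthest_optimized; infer_instance
def pvWitness_furthest_optimized : Int × List Int := (10, [3])
def Spec_furthest_optimized (num_holes : Int) (cafes : List Int) (out : Int) : Prop := out = furthest_optimized_alt num_holes cafes
instance (num_holes : Int) (cafes : List Int) (out : Int) : Decidable (Spec_furthest_optimized num_holes cafes out) := by unfold Spec_furthest_optimized; infer_instance

-- ===== CLAIM (what is proved, stated in full; the proofs are below) =====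
def Claim_equal_furthest_optimized : Prop := ∀ (num_holes : Int) (cafes : List Int), Dom_furthest_optimized num_holes cafes → Pre_furthest_optimized num_holes cafes → Spec_furthest_optimized num_holes cafes (furthest_optimized num_holes cafes)

-- ===== LEMMAS AND PROOFS =====

-- the half-gaps of the consecutive pairs of a list
def gaps : List Int → List Int
  | [] => []
  | [_] => []
  | a :: b :: r => Int.tdiv (b - a) 2 :: gaps (b :: r)

-- the half-gap at index i, as B's recursion reads it off the list
def ghalf (cafes : List Int) (i : Nat) : Int :=
  Int.tdiv (PySem.List.pyGetD cafes ((i : Int) + 1) 0 - PySem.List.pyGetD cafes (i : Int) 0) 2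

-- A's loop, re-expressed on the raw list (lower/higher folded in as it walks the triples)
def tf : Int → Int → List Int → Int
  | init, _, [] => init
  | init, _, [_] => init
  | init, a, b :: c :: r => tf (max (max init (Int.tdiv (b - a) 2)) (Int.tdiv (c - b) 2)) b (c :: r)

lemma maxStep (L x : Int) : (if x > L then x else L) = max L x := by
  split <;> omega

lemma pybump_max (L x : Int) : pybump L x = max L x := by
  unfold pybump; split <;> omega

-- A's enumerate loop equals tf, by walking the list with the index offset as invariant
lemma loopA : ∀ (rest : List Int) (cafes : List Int) (k : Nat) (a init : Int),
    cafes.drop k = a :: rest →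
    (PySem.List.enumerate rest.dropLast (k : Int)).foldl
      (fun L p =>
        let lower := Int.tdiv (p.2 - PySem.List.pyGetD cafes p.1 0) 2
        let higher := Int.tdiv (PySem.List.pyGetD cafes (p.1 + 2) 0 - p.2) 2
        pybump (pybump L lower) higher) init
    = tf init a rest := by
  intro rest
  induction rest with
  | nil => intro cafes k a init h; simp [tf, PySem.List.enumerate_nil]
  | cons b t ih =>
    intro cafes k a init h
    cases t with
    | nil => simp [tf, PySem.List.enumerate_nil]
    | cons c r =>
      have hk : PySem.List.pyGetD cafes (k : Int) 0 = a := by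
        rw [PySem.List.pyGetD_natCast]
        have h0 : (List.drop k cafes)[0]? = some a := by rw [h]; rfl
        rw [List.getElem?_drop] at h0
        simp only [Nat.add_zero] at h0
        simp [List.getD, h0]
      have hk2 : PySem.List.pyGetD cafes ((k : Int) + 2) 0 = c := by
        have hc : ((k : Int) + 2) = ((k + 2 : Nat) : Int) := by omega
        rw [hc, PySem.List.pyGetD_natCast]
        have h0 : (List.drop k cafes)[2]? = some c := by rw [h]; rfl
        rw [List.getElem?_drop] at h0
        simp [List.getD, h0]
      have hdrop1 : cafes.drop (k + 1) = b :: c :: r := by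
        have h1 := congrArg (List.drop 1) h
        rw [List.drop_drop] at h1
        simpa [Nat.add_comm] using h1
      have hcast : (k : Int) + 1 = ((k + 1 : Nat) : Int) := by omega
      have ihx := ih cafes (k + 1) b
        (max (max init (Int.tdiv (b - a) 2)) (Int.tdiv (c - b) 2)) hdrop1
      simp only [List.dropLast_cons₂, PySem.List.enumerate_cons, List.foldl_cons, hk, hk2,
        pybump_max, hcast] at ihx ⊢
      rw [ihx]
      rfl

lemma tf_gaps : ∀ (r : List Int) (c b init : Int),
    tf (max init (Int.tdiv (c - b) 2)) b (c :: r) = (gaps (b :: c :: r)).foldl max init := by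
  intro r
  induction r with
  | nil => intro c b init; simp [tf, gaps]
  | cons d r2 ih =>
    intro c b init
    rw [tf]
    have hidem : max (max (max init (Int.tdiv (c - b) 2)) (Int.tdiv (c - b) 2)) (Int.tdiv (d - c) 2)
        = max (max init (Int.tdiv (c - b) 2)) (Int.tdiv (d - c) 2) := by omega
    rw [hidem, ih d c (max init (Int.tdiv (c - b) 2))]
    simp [gaps]

lemma slice_mid (a b : Int) (l : List Int) :
    PySem.List.slice (a :: b :: l) (some 1) (some (-1)) = (b :: l).dropLast := by
  simp [PySem.List.slice, List.dropLast_eq_take]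

-- gaps of a suffix, read as ghalf over an index range
lemma gaps_range : ∀ (l : List Int) (cafes : List Int) (k : Nat), cafes.drop k = l →
    gaps l = (List.range' k (l.length - 1)).map (ghalf cafes) := by
  intro l
  induction l with
  | nil => intro cafes k h; simp [gaps]
  | cons a t ih =>
    intro cafes k h
    cases t with
    | nil => simp [gaps]
    | cons b r =>
      have hk : PySem.List.pyGetD cafes (k : Int) 0 = a := by
        rw [PySem.List.pyGetD_natCast]
        have h0 : (List.drop k cafes)[0]? = some a := by rw [h]; rfl
        rw [List.getElem?_drop] at h0
        simp only [Nat.add_zero] at h0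
        simp [List.getD, h0]
      have hk1 : PySem.List.pyGetD cafes ((k : Int) + 1) 0 = b := by
        have hc : ((k : Int) + 1) = ((k + 1 : Nat) : Int) := by omega
        rw [hc, PySem.List.pyGetD_natCast]
        have h0 : (List.drop k cafes)[1]? = some b := by rw [h]; rfl
        rw [List.getElem?_drop] at h0
        simp [List.getD, h0]
      have hdrop1 : cafes.drop (k + 1) = b :: r := by
        have h1 := congrArg (List.drop 1) h
        rw [List.drop_drop] at h1
        simpa [Nat.add_comm] using h1
      have hlen : (a :: b :: r).length - 1 = ((b :: r).length - 1) + 1 := by simp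
      rw [hlen, List.range'_succ, List.map_cons]
      rw [gaps, ih cafes (k + 1) hdrop1]
      simp [ghalf, hk, hk1]

-- B's divide-and-conquer recursion folded into a running max over the index range
lemma mh_fold (cafes : List Int) : ∀ (n : Nat), ∀ (lo hi : Nat), hi - lo = n → lo < hi → ∀ (x : Int),
    List.foldl (fun a i => max a (ghalf cafes i)) x (List.range' lo (hi - lo))
      = max x (maxhalf cafes lo hi) := by
  intro n
  induction n using Nat.strong_induction_on with
  | _ n ih =>
    intro lo hi hn hlt x
    rw [maxhalf]
    by_cases h : hi ≤ lo + 1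
    · have h1 : hi - lo = 1 := by omega
      rw [if_pos h, h1]
      simp [List.range', ghalf]
    · rw [if_neg h]
      have h1 : lo < (lo + hi) / 2 := by omega
      have h2 : (lo + hi) / 2 < hi := by omega
      have hsplit : List.range' lo (hi - lo)
          = List.range' lo ((lo + hi) / 2 - lo) ++ List.range' ((lo + hi) / 2) (hi - (lo + hi) / 2) := by
        have h3 : List.range' lo ((lo + hi) / 2 - lo) ++ List.range' (lo + 1 * ((lo + hi) / 2 - lo)) (hi - (lo + hi) / 2) = List.range' lo (((lo + hi) / 2 - lo) + (hi - (lo + hi) / 2)) := List.range'_append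
        rw [show lo + 1 * ((lo + hi) / 2 - lo) = (lo + hi) / 2 by omega] at h3
        rw [show (lo + hi) / 2 - lo + (hi - (lo + hi) / 2) = hi - lo by omega] at h3
        exact h3.symm
      rw [hsplit, List.foldl_append]
      rw [ih ((lo + hi) / 2 - lo) (by omega) lo ((lo + hi) / 2) rfl h1 x]
      rw [ih (hi - (lo + hi) / 2) (by omega) ((lo + hi) / 2) hi rfl h2 _]
      simp only [maxStep]
      omega

-- A in normal form: one foldl max over the half-gaps, seeded with the endpoint candidates
lemma aEq (nh : Int) (cafes : List Int) (hpre : cafes ≠ []) :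
    furthest_optimized nh cafes
      = (gaps cafes).foldl max
          (max (max 0 (PySem.List.pyGetD cafes 0 0)) (nh - 1 - PySem.List.pyGetD cafes (-1) 0)) := by
  match cafes, hpre with
  | [a], _ =>
    unfold furthest_optimized
    have h1 : PySem.List.pyGetD [a] (-1) 0 = a := by
      simp [PySem.List.pyGetD, PySem.List.pyGet?, PySem.List.pyIdx?]
    simp [gaps, PySem.List.pyGetD_zero_cons, h1, pybump_max, Int.tdiv]
  | [a, b], _ =>
    unfold furthest_optimized
    have h1 : PySem.List.pyGetD [a, b] (-1) 0 = b := by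
      simp [PySem.List.pyGetD, PySem.List.pyGet?, PySem.List.pyIdx?]
    simp [gaps, PySem.List.pyGetD_zero_cons, h1, pybump_max]
  | a :: b :: c :: r, _ =>
    unfold furthest_optimized
    have hlen : ((a :: b :: c :: r).length : Int) > 2 := by simp; omega
    rw [if_pos hlen, slice_mid]
    have hloop := loopA (b :: c :: r) (a :: b :: c :: r) 0 a
      (pybump (pybump 0 (PySem.List.pyGetD (a :: b :: c :: r) 0 0))
        (nh - 1 - PySem.List.pyGetD (a :: b :: c :: r) (-1) 0))
      rfl
    rw [show ((0 : Nat) : Int) = (0 : Int) from rfl] at hloop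
    rw [hloop]
    rw [show tf _ a (b :: c :: r)
          = tf (max (max _ (Int.tdiv (b - a) 2)) (Int.tdiv (c - b) 2)) b (c :: r) from rfl]
    rw [tf_gaps]
    simp only [pybump_max, gaps, List.foldl_cons]

-- ===== VERDICT (by name: the statement is the Claim_ definition above) =====
theorem furthest_optimized_spec : Claim_equal_furthest_optimized := by
  intro num_holes cafes _ hpre
  unfold Spec_furthest_optimized
  rw [aEq num_holes cafes hpre]
  unfold furthest_optimized_alt
  simp only [maxStep]
  by_cases hlen : (cafes.length : Int) ≥ 2
  · rw [if_pos hlen]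
    have hlt : 0 < cafes.length - 1 := by omega
    have := mh_fold cafes (cafes.length - 1) 0 (cafes.length - 1) rfl hlt
      (max (max 0 (PySem.List.pyGetD cafes 0 0)) (num_holes - 1 - PySem.List.pyGetD cafes (-1) 0))
    rw [gaps_range cafes cafes 0 rfl, List.foldl_map]
    rw [Nat.sub_zero] at this
    exact this
  · rw [if_neg hlen]
    have h1 : cafes.length = 1 := by
      have : cafes.length ≠ 0 := by simpa using hpre
      omega
    match cafes, h1 with
    | [a], _ => simp [gaps]
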